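-- pv_equiv track=rewrite | github.com/tangjiewei0336/ascii_choir | src/ui/gui.py | _get_prev_note_token
-- ===== SOURCE A (Python) =====
-- def _get_prev_note_token(content_before_cursor: str) -> str | None:
--     """从光标前内容提取最后一个音符 token（用于 ~ 自动重复）。不含 ~ 前缀。"""
--     before = content_before_cursor.rstrip()
--     if not before:
--         return None
--     # 从末尾向前找 token 边界（空格、|、[]() 等）
--     i = len(before) - 1
--     while i >= 0 and before[i] not in " \t\n|[]()":
--         i -= 1
--     tok = before[i + 1 :].lstrip("~")
--     if not tok or not any(c.isdigit() for c in tok):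
--         return None
--     return tok
-- ===== SOURCE B (Python) =====
-- DELIMS = " \t\n|[]()"
--
-- def _get_prev_note_token(content_before_cursor: str) -> str | None:
--     """Single forward pass: keep an accumulator of the current token, reset at each delimiter."""
--     before = content_before_cursor.rstrip()
--     if not before:
--         return None
--     raw = ""
--     for c in before:
--         raw = "" if c in DELIMS else raw + c
--     tok = raw.lstrip("~")
--     if tok and any(ch.isdigit() for ch in tok):
--         return tok
--     return None
-- ===== Notes on version B (the rewrite author's own statement) =====
-- stated objective: alternative
-- what changed: A scans backward from the end with an index while-loop to find the last token boundary and slices; B makes one forward pass keeping a current-token accumulator that resets at each delimiter, then validates the final accumulator.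
import Mathlib
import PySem

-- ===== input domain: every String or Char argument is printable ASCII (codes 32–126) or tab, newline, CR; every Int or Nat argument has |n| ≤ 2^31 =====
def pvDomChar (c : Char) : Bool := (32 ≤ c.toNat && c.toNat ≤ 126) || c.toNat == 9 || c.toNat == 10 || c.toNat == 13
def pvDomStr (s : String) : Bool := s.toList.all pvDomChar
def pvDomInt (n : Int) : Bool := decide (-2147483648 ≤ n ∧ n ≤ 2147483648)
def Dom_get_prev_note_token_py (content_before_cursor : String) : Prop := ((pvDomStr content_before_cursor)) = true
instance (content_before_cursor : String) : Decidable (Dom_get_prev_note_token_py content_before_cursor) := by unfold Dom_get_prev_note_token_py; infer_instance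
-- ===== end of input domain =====

-- B replaces A's backward index scan for the last token boundary by a single forward pass
-- with a reset-on-delimiter accumulator (objective: alternative decomposition, same cost).

-- ===== PORT A =====
-- `c in " \t\n|[]()"` for a single char is membership in that character set (exact).
def pvIsDelim (c : Char) : Bool := (" \t\n|[]()".toList).contains c

-- A's while loop `while i >= 0 and before[i] not in ...: i -= 1`, returning i+1 (the slice
-- start) as a Nat; argument j stands for i+1, so j = 0 is Python's i = -1.
-- `before[i]` is in range whenever the loop reads it (j ≤ length at every call), so getD is exact.
def pvScanA (l : List Char) : Nat → Nat
  | 0 => 0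
  | j+1 => if ¬ pvIsDelim (l.getD j ' ') then pvScanA l j else j+1

def get_prev_note_token_py (content_before_cursor : String) : Option String :=
  let before := PySem.Chars.rstrip content_before_cursor.toList
  if before = [] then none
  else
    -- before[i+1:].lstrip("~"); lstrip with the one-char set "~" is dropWhile (· == '~') (exact)
    let tok := (PySem.List.slice before (some ((pvScanA before before.length : Nat) : Int)) none).dropWhile (· == '~')
    if tok = [] ∨ tok.any PySem.Chars.isdigit = false then none
    else some (String.ofList tok)

-- ===== PORT B =====
-- Source B's forward loop: raw = "" if c in DELIMS else raw + c
def pvLastRaw (l : List Char) : List Char :=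
  l.foldl (fun raw c => if pvIsDelim c then [] else raw ++ [c]) []

def get_prev_note_token_py_alt (content_before_cursor : String) : Option String :=
  let before := PySem.Chars.rstrip content_before_cursor.toList
  if before = [] then none
  else
    let tok := (pvLastRaw before).dropWhile (· == '~')
    if tok ≠ [] ∧ tok.any PySem.Chars.isdigit then some (String.ofList tok)
    else none

-- ===== PRECONDITION & SPEC =====
def Spec_get_prev_note_token_py (content_before_cursor : String) (out : Option String) : Prop := out = get_prev_note_token_py_alt content_before_cursor
instance (content_before_cursor : String) (out : Option String) : Decidable (Spec_get_prev_note_token_py content_before_cursor out) := by unfold Spec_get_prev_note_token_py; infer_instance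

-- ===== CLAIM (what is proved, stated in full; the proofs are below) =====
def Claim_equal_get_prev_note_token_py : Prop := ∀ (content_before_cursor : String), Dom_get_prev_note_token_py content_before_cursor → Spec_get_prev_note_token_py content_before_cursor (get_prev_note_token_py content_before_cursor)

-- ===== LEMMAS AND PROOFS =====

theorem pvScanA_le (l : List Char) (j : Nat) : pvScanA l j ≤ j := by
  induction j with
  | zero => simp [pvScanA]
  | succ j ih => simp only [pvScanA]; split <;> omega

theorem pvScanA_append (l : List Char) (c : Char) (j : Nat) (h : j ≤ l.length) :
    pvScanA (l ++ [c]) j = pvScanA l j := by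
  induction j with
  | zero => rfl
  | succ j ih =>
    have hg : (l ++ [c]).getD j ' ' = l.getD j ' ' := by
      rw [List.getD_eq_getElem?_getD, List.getElem?_append_left (by omega),
          List.getD_eq_getElem?_getD]
    simp only [pvScanA]
    rw [hg, ih (by omega)]

theorem pvDropScan_append (l : List Char) (c : Char) :
    (l ++ [c]).drop (pvScanA (l ++ [c]) (l ++ [c]).length)
      = if pvIsDelim c then [] else l.drop (pvScanA l l.length) ++ [c] := by
  have hlen : (l ++ [c]).length = l.length + 1 := by simp
  have hget : (l ++ [c]).getD l.length ' ' = c := by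
    rw [List.getD_eq_getElem?_getD, List.getElem?_concat_length]; rfl
  rw [hlen]
  simp only [pvScanA]
  rw [hget]
  by_cases hd : pvIsDelim c
  · rw [if_neg (by simp [hd]), if_pos hd]
    exact List.drop_eq_nil_of_le (by simp)
  · rw [if_pos (by simp [hd]), if_neg hd, pvScanA_append l c l.length le_rfl,
        List.drop_append_of_le_length (pvScanA_le l l.length)]

theorem pvLastRaw_eq_dropScan (l : List Char) :
    pvLastRaw l = l.drop (pvScanA l l.length) := by
  induction l using List.reverseRecOn with
  | nil => rfl
  | append_singleton l c ih =>
    have hstep : pvLastRaw (l ++ [c]) = if pvIsDelim c then [] else pvLastRaw l ++ [c] := by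
      simp [pvLastRaw, List.foldl_append]
    rw [hstep, ih, pvDropScan_append]

-- ===== VERDICT (by name: the statement is the Claim_ definition above) =====
theorem get_prev_note_token_py_spec : Claim_equal_get_prev_note_token_py := by
  intro s _
  unfold Spec_get_prev_note_token_py
  simp only [get_prev_note_token_py, get_prev_note_token_py_alt]
  by_cases hb : PySem.Chars.rstrip s.toList = []
  · simp [hb]
  · rw [if_neg hb, if_neg hb]
    have hs : PySem.List.slice (PySem.Chars.rstrip s.toList)
        (some ((pvScanA (PySem.Chars.rstrip s.toList) (PySem.Chars.rstrip s.toList).length : Nat) : Int)) none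
        = (PySem.Chars.rstrip s.toList).drop (pvScanA (PySem.Chars.rstrip s.toList) (PySem.Chars.rstrip s.toList).length) := by
      simp [PySem.List.slice_from]
    rw [hs, ← pvLastRaw_eq_dropScan]
    set tok := (pvLastRaw (PySem.Chars.rstrip s.toList)).dropWhile (fun c => c == '~') with htok
    by_cases h1 : tok = [] ∨ tok.any PySem.Chars.isdigit = false
    · rw [if_pos h1, if_neg (by rcases h1 with h | h <;> simp [h])]
    · rw [if_neg h1, if_pos (by rcases not_or.mp h1 with ⟨h2, h3⟩; exact ⟨h2, by simpa using h3⟩)]
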